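-- pv_equiv track=rewrite | github.com/ramesh8/str-report-parsing | extract_dfs.py | boundaries
-- ===== SOURCE A (Python) =====
-- def boundaries(a, start, end):
--     ranges = []
--     for i in a:
--         if start != i:
--             ranges.append([start, i])
--         start = i + 1
--     if start < end:
--         ranges.append([start, end])
--     return ranges
-- ===== SOURCE B (Python) =====
-- def _gaps(sub, start):
--     """Middle gap ranges of a nonempty chunk, by divide and conquer."""
--     if len(sub) == 1:
--         return [[start, sub[0]]] if start != sub[0] else []
--     m = len(sub) // 2
--     return _gaps(sub[:m], start) + _gaps(sub[m:], sub[m - 1] + 1)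
--
-- def boundaries(a, start, end):
--     a = list(a)
--     mids = _gaps(a, start) if a else []
--     last = a[-1] + 1 if a else start
--     return mids + ([[last, end]] if last < end else [])
-- ===== Notes on version B (the rewrite author's own statement) =====
-- stated objective: alternative
-- what changed: Replaces the single accumulator loop by a divide-and-conquer helper that computes the middle gap ranges of each half and joins them at the left half's last element, with the tail interval computed as a separate step.
import Mathlib
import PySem

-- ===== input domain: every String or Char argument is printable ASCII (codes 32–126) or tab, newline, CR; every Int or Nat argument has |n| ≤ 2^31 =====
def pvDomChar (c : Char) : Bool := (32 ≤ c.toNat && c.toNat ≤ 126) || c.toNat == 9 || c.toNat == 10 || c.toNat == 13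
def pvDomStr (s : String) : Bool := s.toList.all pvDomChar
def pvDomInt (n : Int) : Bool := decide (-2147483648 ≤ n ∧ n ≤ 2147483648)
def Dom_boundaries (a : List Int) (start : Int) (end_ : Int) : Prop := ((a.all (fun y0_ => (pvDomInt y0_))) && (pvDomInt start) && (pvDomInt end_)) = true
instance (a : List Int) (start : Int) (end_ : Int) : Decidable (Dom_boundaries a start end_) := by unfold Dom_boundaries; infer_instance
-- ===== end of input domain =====

-- B replaces A's accumulator loop by divide and conquer on the list (middle gaps of halves joined at the left half's last element) plus a separate tail step (alternative decomposition, same result).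


-- ===== PORT A =====
-- for-loop over `a` carrying (ranges, start); then the final tail check
def boundaries (a : List Int) (start : Int) (end_ : Int) : List (List Int) :=
  let st := a.foldl
    (fun (st : List (List Int) × Int) i =>
      ((if st.2 ≠ i then st.1 ++ [[st.2, i]] else st.1), i + 1))
    ([], start)
  if st.2 < end_ then st.1 ++ [[st.2, end_]] else st.1

-- ===== PORT B =====
-- _gaps: middle gap ranges of a chunk, by divide and conquer (B only calls it on
-- nonempty chunks; the [] case totalizes the Lean function and is unreachable).
-- sub[:m] / sub[m:] with 0 ≤ m ≤ len are exactly take/drop; sub[m-1] is in range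
-- (1 ≤ m ≤ len), ported as getD.
def gapsB : List Int → Int → List (List Int)
  | [], _ => []
  | [x], start => if start ≠ x then [[start, x]] else []
  | x :: y :: t, start =>
      let sub := x :: y :: t
      let m := sub.length / 2
      gapsB (sub.take m) start ++ gapsB (sub.drop m) (sub.getD (m - 1) 0 + 1)
termination_by sub _ => sub.length
decreasing_by
  all_goals simp [List.length_take]; omega

def boundaries_alt (a : List Int) (start : Int) (end_ : Int) : List (List Int) :=
  let mids := if a.isEmpty then [] else gapsB a start
  let last := match a.getLast? with
    | some x => x + 1
    | none => start
  mids ++ (if last < end_ then [[last, end_]] else [])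

-- ===== PRECONDITION & SPEC =====
def Spec_boundaries (a : List Int) (start : Int) (end_ : Int) (out : List (List Int)) : Prop := out = boundaries_alt a start end_
instance (a : List Int) (start : Int) (end_ : Int) (out : List (List Int)) : Decidable (Spec_boundaries a start end_ out) := by unfold Spec_boundaries; infer_instance

-- ===== CLAIM (what is proved, stated in full; the proofs are below) =====
def Claim_equal_boundaries : Prop := ∀ (a : List Int) (start : Int) (end_ : Int), Dom_boundaries a start end_ → Spec_boundaries a start end_ (boundaries a start end_)

-- ===== LEMMAS AND PROOFS =====

-- the middle ranges of A, as a recursive function of the list and the running start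
def pvMid : List Int → Int → List (List Int)
  | [], _ => []
  | x :: t, s => (if s ≠ x then [[s, x]] else []) ++ pvMid t (x + 1)

-- A's final value of `start`
def pvFin : List Int → Int → Int
  | [], s => s
  | x :: t, _ => pvFin t (x + 1)

lemma pvFin_getLast : ∀ (u : List Int) (s : Int),
    pvFin u s = match u.getLast? with | some x => x + 1 | none => s := by
  intro u
  induction u with
  | nil => intro s; rfl
  | cons x t ih =>
      intro s
      cases t with
      | nil => rfl
      | cons y t' =>
          rw [show pvFin (x :: y :: t') s = pvFin (y :: t') (x + 1) from rfl,
            ih, List.getLast?_cons_cons]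
          cases hg : (y :: t').getLast? with
          | none => simp [List.getLast?_eq_none_iff] at hg
          | some z => rfl

lemma pvMid_append : ∀ (u v : List Int) (s : Int),
    pvMid (u ++ v) s = pvMid u s ++ pvMid v (pvFin u s) := by
  intro u
  induction u with
  | nil => intro v s; simp [pvMid, pvFin]
  | cons x t ih => intro v s; simp [pvMid, pvFin, ih]

lemma foldA (a : List Int) : ∀ (ranges : List (List Int)) (s : Int),
    a.foldl (fun (st : List (List Int) × Int) i =>
        ((if st.2 ≠ i then st.1 ++ [[st.2, i]] else st.1), i + 1)) (ranges, s)
      = (ranges ++ pvMid a s, pvFin a s) := by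
  induction a with
  | nil => intro ranges s; simp [pvMid, pvFin]
  | cons i t ih =>
      intro ranges s
      simp only [List.foldl_cons, ih, pvMid, pvFin]
      split_ifs <;> simp

lemma gapsB_eq_pvMid : ∀ (sub : List Int) (s : Int), gapsB sub s = pvMid sub s := by
  intro sub s
  induction sub, s using gapsB.induct with
  | case1 s => rw [gapsB]; rfl
  | case2 x s h => rw [gapsB]; simp [pvMid, h]
  | case3 x s h => simp [gapsB, pvMid, h]
  | case4 x y t s _sub _m ih1 ih2 =>
      rw [gapsB]
      rw [ih1, ih2]
      have hm1 : 1 ≤ (x :: y :: t).length / 2 := by simp; omega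
      have hm2 : (x :: y :: t).length / 2 < (x :: y :: t).length := by simp; omega
      have hlast : ((x :: y :: t).take ((x :: y :: t).length / 2)).getLast?
          = some ((x :: y :: t).getD ((x :: y :: t).length / 2 - 1) 0) := by
        rw [List.getLast?_eq_getElem?, List.getElem?_take_of_lt (by
          rw [List.length_take]; omega)]
        rw [List.length_take, List.getD_eq_getElem?_getD]
        rw [show min ((x :: y :: t).length / 2) (x :: y :: t).length
              = (x :: y :: t).length / 2 by omega]
        rw [List.getElem?_eq_getElem (by omega)]
        simp
      have := pvMid_append ((x :: y :: t).take ((x :: y :: t).length / 2))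
        ((x :: y :: t).drop ((x :: y :: t).length / 2)) s
      rw [List.take_append_drop] at this
      rw [this, pvFin_getLast, hlast]

-- ===== VERDICT (by name: the statement is the Claim_ definition above) =====
theorem boundaries_spec : Claim_equal_boundaries := by
  intro a start end_ _
  show boundaries a start end_ = boundaries_alt a start end_
  unfold boundaries boundaries_alt
  rw [foldA, pvFin_getLast]
  cases a with
  | nil => simp [pvMid]
  | cons x t =>
      simp only [List.isEmpty_cons, Bool.false_eq_true, if_false]
      rw [gapsB_eq_pvMid]
      split_ifs <;> simp
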